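-- pv_equiv track=rewrite | github.com/qianliu013/leetcode | medium/318.py | _solve
-- ===== SOURCE A (Python) =====
-- def _solve(words):
--     res = {}
--     for word in words:
--         bit_int = 0
--         for ch in word:
--             bit_int |= (1 << (ord(ch) - 97))
--         res[bit_int] = max(res.get(bit_int, 0), len(word))
--     return max([res[a] * res[b] for a in res for b in res if not a & b] or [0])
-- ===== SOURCE B (Python) =====
-- def _solve(words):
--     best = 0
--     seen = []  # one (mask, max length so far) record per distinct mask, in first-seen order
--     for word in words:
--         m = 0
--         for ch in word:
--             m |= 1 << (ord(ch) - 97)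
--         l = len(word)
--         bp = 0        # best disjoint partner length among earlier words
--         has = False   # is there already a record for this mask?
--         for pm, pl in seen:
--             if m & pm == 0 and pl > bp:
--                 bp = pl
--             if pm == m:
--                 has = True
--         if l * bp > best:
--             best = l * bp
--         if has:
--             seen = [(pm, max(pl, l)) if pm == m else (pm, pl) for pm, pl in seen]
--         else:
--             seen.append((m, l))
--     return best
-- ===== Notes on version B (the rewrite author's own statement) =====
-- stated objective: alternative
-- what changed: B is an online single pass with no mask-dedup dictionary: each word is matched only against the previously seen (mask,len) pairs to find its best disjoint partner and update a running best, so each unordered pair is examined once, instead of A's dict keyed by mask followed by a comprehension over all ordered distinct-mask pairs fed to max().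
import Mathlib
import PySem

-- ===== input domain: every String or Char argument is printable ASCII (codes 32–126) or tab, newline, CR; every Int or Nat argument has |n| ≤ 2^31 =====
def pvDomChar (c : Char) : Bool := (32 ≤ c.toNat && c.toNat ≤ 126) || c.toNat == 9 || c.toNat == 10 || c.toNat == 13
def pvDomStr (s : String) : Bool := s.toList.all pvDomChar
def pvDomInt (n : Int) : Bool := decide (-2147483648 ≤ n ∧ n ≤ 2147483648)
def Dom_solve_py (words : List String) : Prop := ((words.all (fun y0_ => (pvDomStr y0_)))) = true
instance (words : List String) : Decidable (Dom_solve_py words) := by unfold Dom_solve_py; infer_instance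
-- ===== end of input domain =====

-- B replaces A's dedup-by-mask dictionary with an online single pass: each word is matched
-- against the previously seen (mask,len) pairs only (objective: alternative, same asymptotic cost).

-- ===== PORT A =====
-- shared helper: the bitmask loop 'bit |= 1 << (ord(ch)-97)', identical in both Pythons
-- (exact on Pre_: every char code ≥ 97, so the shift count is the nonnegative ch.toNat-97)
def pvMask (w : String) : Nat :=
  w.toList.foldl (fun m ch => m ||| (1 <<< (ch.toNat - 97))) 0

def solve_py (words : List String) : Int :=
  let res : PySem.Dict Nat Int :=
    words.foldl (fun res word =>
      let bit := pvMask word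
      res.insert bit (max (res.getD bit 0) (PySem.Str.len word))) PySem.Dict.empty
  let prods := res.keys.flatMap (fun a =>
    (res.keys.filter (fun b => a &&& b == 0)).map (fun b => res.getD a 0 * res.getD b 0))
  match PySem.List.max? prods (fun x => x) with
  | some m => m
  | none => 0

-- ===== PORT B =====
-- state: (running best, one (mask, max length) record per distinct mask seen so far)
def solve_py_alt (words : List String) : Int :=
  (words.foldl (fun (st : Int × List (Nat × Int)) word =>
    let m := pvMask word
    let l := PySem.Str.len word
    let s := st.2.foldl (fun (s : Int × Bool) p =>
      (if m &&& p.1 == 0 && p.2 > s.1 then p.2 else s.1,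
       if p.1 == m then true else s.2)) (0, false)
    (if l * s.1 > st.1 then l * s.1 else st.1,
     if s.2 then st.2.map (fun p => if p.1 == m then (p.1, max p.2 l) else p)
     else st.2 ++ [(m, l)]))
    ((0 : Int), ([] : List (Nat × Int)))).1

-- ===== PRECONDITION & SPEC =====
-- Pre_ excludes exactly the inputs on which the Python A raises ValueError ('negative
-- shift count'): some word contains a character with code < 97 (below 'a'). B raises there too.
def Pre_solve_py (words : List String) : Prop :=
  (words.all (fun w => w.toList.all (fun c => 97 ≤ c.toNat))) = true
instance (words : List String) : Decidable (Pre_solve_py words) := by unfold Pre_solve_py; infer_instance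
def pvWitness_solve_py : List String := (["ab", "z"])

def Spec_solve_py (words : List String) (out : Int) : Prop := out = solve_py_alt words
instance (words : List String) (out : Int) : Decidable (Spec_solve_py words out) := by unfold Spec_solve_py; infer_instance

-- ===== CLAIM (what is proved, stated in full; the proofs are below) =====
def Claim_equal_solve_py : Prop := ∀ (words : List String), Dom_solve_py words → Pre_solve_py words → Spec_solve_py words (solve_py words)

-- ===== LEMMAS AND PROOFS =====

-- max length among words (so far) whose mask is m — what A's dict stores at key m
def pvGm (ws : List String) (m : Nat) : Int :=
  ws.foldl (fun acc w => if pvMask w = m then max acc (PySem.Str.len w) else acc) 0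

theorem pvLen_nonneg (w : String) : 0 ≤ PySem.Str.len w := by
  simp [PySem.Str.len_eq]

-- ---- generic foldl lemmas ----
theorem pvFoldl_init_le {α : Type} (l : List α) (g : Int → α → Int)
    (hmono : ∀ b x, b ≤ g b x) (b : Int) : b ≤ l.foldl g b := by
  induction l generalizing b with
  | nil => simp
  | cons x xs ih => exact le_trans (hmono b x) (ih (g b x))

theorem pvFoldl_attain {α : Type} (l : List α) (g : Int → α → Int)
    (hmono : ∀ b x, b ≤ g b x) (x₀ : α) (hx : x₀ ∈ l) (c : Int)
    (hc : ∀ b, c ≤ g b x₀) (b : Int) : c ≤ l.foldl g b := by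
  induction l generalizing b with
  | nil => cases hx
  | cons x xs ih =>
    rcases List.mem_cons.mp hx with h | h
    · subst h
      exact le_trans (hc b) (pvFoldl_init_le xs g hmono (g b x₀))
    · exact ih h (g b x)

-- ---- pvGm facts ----
theorem pvGm_eq_foldl_map (ws : List String) (m : Nat) :
    pvGm ws m = ((ws.filter (fun w => decide (pvMask w = m))).map PySem.Str.len).foldl max 0 := by
  unfold pvGm
  rw [PySem.List.foldl_ite_eq_foldl_filter, List.foldl_map]

theorem pvGm_nonneg (ws : List String) (m : Nat) : 0 ≤ pvGm ws m := by
  rw [pvGm_eq_foldl_map]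
  exact (PySem.List.le_foldl_max _ _).1

theorem pvGm_ge (ws : List String) (w : String) (hw : w ∈ ws) :
    PySem.Str.len w ≤ pvGm ws (pvMask w) := by
  rw [pvGm_eq_foldl_map]
  exact (PySem.List.le_foldl_max _ _).2 _ (List.mem_map_of_mem (List.mem_filter.mpr ⟨hw, by simp⟩))

theorem pvGm_attained (ws : List String) (m : Nat) (hm : m ∈ ws.map pvMask) :
    ∃ w ∈ ws, pvMask w = m ∧ pvGm ws m = PySem.Str.len w := by
  obtain ⟨w₀, hw₀, hmw₀⟩ := List.mem_map.mp hm
  have hmem : w₀ ∈ ws.filter (fun w => decide (pvMask w = m)) :=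
    List.mem_filter.mpr ⟨hw₀, by simp [hmw₀]⟩
  rcases PySem.List.foldl_max_mem (((ws.filter (fun w => decide (pvMask w = m))).map PySem.Str.len)) 0 with h | h
  · have hle : PySem.Str.len w₀ ≤ pvGm ws m := by
      rw [pvGm_eq_foldl_map]
      exact (PySem.List.le_foldl_max _ _).2 _ (List.mem_map_of_mem hmem)
    have hg : pvGm ws m = 0 := by rw [pvGm_eq_foldl_map, h]
    refine ⟨w₀, hw₀, hmw₀, ?_⟩
    have := pvLen_nonneg w₀
    omega
  · obtain ⟨w, hwmem, hlw⟩ := List.mem_map.mp h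
    have hwf := List.mem_filter.mp hwmem
    refine ⟨w, hwf.1, by simpa using hwf.2, ?_⟩
    rw [pvGm_eq_foldl_map, hlw]

-- ---- A's dict characterisation ----
theorem pvBuild_getD (ws : List String) (d : PySem.Dict Nat Int) (m : Nat) :
    (ws.foldl (fun res word =>
        res.insert (pvMask word) (max (res.getD (pvMask word) 0) (PySem.Str.len word))) d).getD m 0
      = ws.foldl (fun acc w => if pvMask w = m then max acc (PySem.Str.len w) else acc) (d.getD m 0) := by
  induction ws generalizing d with
  | nil => rfl
  | cons w t ih =>
    simp only [List.foldl_cons]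
    rw [ih]
    congr 1
    rw [PySem.Dict.getD_insert]
    by_cases h : pvMask w = m
    · simp [h]
    · rw [if_neg (Ne.symm h), if_neg h]

theorem pvBuild_getD_empty (ws : List String) (m : Nat) :
    (ws.foldl (fun res word =>
        res.insert (pvMask word) (max (res.getD (pvMask word) 0) (PySem.Str.len word))) PySem.Dict.empty).getD m 0
      = pvGm ws m := by
  rw [pvBuild_getD]
  rfl

theorem pvBuild_keys (ws : List String) (m : Nat) :
    m ∈ (ws.foldl (fun res word =>
        res.insert (pvMask word) (max (res.getD (pvMask word) 0) (PySem.Str.len word))) PySem.Dict.empty).keys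
      ↔ m ∈ ws.map pvMask := by
  rw [PySem.Dict.keys_foldl_insert_key (key := pvMask)
    (f := fun res word => max (res.getD (pvMask word) 0) (PySem.Str.len word))]
  simp [PySem.Dict.keys_empty, PySem.Set.update_nil_left, PySem.Set.mem_ofList]

-- ---- named views of the two ports (definitional) ----
def pvDict (ws : List String) : PySem.Dict Nat Int :=
  ws.foldl (fun res word =>
    res.insert (pvMask word) (max (res.getD (pvMask word) 0) (PySem.Str.len word))) PySem.Dict.empty

def pvProds (ws : List String) : List Int :=
  (pvDict ws).keys.flatMap (fun a =>
    ((pvDict ws).keys.filter (fun b => a &&& b == 0)).map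
      (fun b => (pvDict ws).getD a 0 * (pvDict ws).getD b 0))

theorem pvA_eq (ws : List String) :
    solve_py ws = match PySem.List.max? (pvProds ws) (fun x => x) with
      | some m => m | none => 0 := rfl

theorem pvMem_prods (ws : List String) (x : Int) :
    x ∈ pvProds ws ↔ ∃ a b : Nat, a ∈ ws.map pvMask ∧ b ∈ ws.map pvMask ∧ a &&& b = 0 ∧
      x = pvGm ws a * pvGm ws b := by
  have hk : ∀ m : Nat, m ∈ (pvDict ws).keys ↔ m ∈ ws.map pvMask := pvBuild_keys ws
  have hg : ∀ m : Nat, (pvDict ws).getD m 0 = pvGm ws m := pvBuild_getD_empty ws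
  simp only [pvProds, List.mem_flatMap, List.mem_map, List.mem_filter, hk, hg, beq_iff_eq]
  constructor
  · rintro ⟨a, ha, b, ⟨hb, hab⟩, hx⟩
    exact ⟨a, b, ha, hb, hab, hx.symm⟩
  · rintro ⟨a, b, ha, hb, hab, hx⟩
    exact ⟨a, ha, b, ⟨hb, hab⟩, hx.symm⟩

theorem pvProds_nonneg (ws : List String) (x : Int) (hx : x ∈ pvProds ws) : 0 ≤ x := by
  obtain ⟨a, b, -, -, -, hx⟩ := (pvMem_prods ws x).mp hx
  exact hx ▸ mul_nonneg (pvGm_nonneg ws a) (pvGm_nonneg ws b)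

theorem pvLe_A (ws : List String) (x : Int) (hx : x ∈ pvProds ws) : x ≤ solve_py ws := by
  rw [pvA_eq]
  cases hm : PySem.List.max? (pvProds ws) (fun x => x) with
  | none =>
    rw [PySem.List.max?_eq_none_iff] at hm
    simp [hm] at hx
  | some M => exact PySem.List.max?_isMax hm x hx

theorem pvA_nonneg (ws : List String) : 0 ≤ solve_py ws := by
  rw [pvA_eq]
  cases hm : PySem.List.max? (pvProds ws) (fun x => x) with
  | none => simp
  | some M => exact pvProds_nonneg ws M (PySem.List.max?_mem hm)

-- ---- B-side: names for B's step and its scan over the records ----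
def pvBp (m : Nat) (seen : List (Nat × Int)) : Int :=
  seen.foldl (fun bp p => if m &&& p.1 == 0 && p.2 > bp then p.2 else bp) 0

def pvScan (m : Nat) (seen : List (Nat × Int)) : Int × Bool :=
  seen.foldl (fun (s : Int × Bool) p =>
    (if m &&& p.1 == 0 && p.2 > s.1 then p.2 else s.1,
     if p.1 == m then true else s.2)) (0, false)

def pvF (st : Int × List (Nat × Int)) (word : String) : Int × List (Nat × Int) :=
  let m := pvMask word
  let l := PySem.Str.len word
  let s := pvScan m st.2
  (if l * s.1 > st.1 then l * s.1 else st.1,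
   if s.2 then st.2.map (fun p => if p.1 == m then (p.1, max p.2 l) else p)
   else st.2 ++ [(m, l)])

theorem pvAlt_eq (ws : List String) : solve_py_alt ws = (ws.foldl pvF (0, [])).1 := rfl

theorem pvScan_eq (m : Nat) (seen : List (Nat × Int)) :
    ∀ (b : Int) (h : Bool),
      seen.foldl (fun (s : Int × Bool) p =>
        (if m &&& p.1 == 0 && p.2 > s.1 then p.2 else s.1,
         if p.1 == m then true else s.2)) (b, h)
      = (seen.foldl (fun bp p => if m &&& p.1 == 0 && p.2 > bp then p.2 else bp) b,
         h || seen.any (fun p => p.1 == m)) := by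
  induction seen with
  | nil => intro b h; simp
  | cons q t ih =>
    intro b h
    simp only [List.foldl_cons, List.any_cons]
    rw [ih]
    congr 1
    cases hq : (q.1 == m) <;> simp

theorem pvScan_fst (m : Nat) (seen : List (Nat × Int)) : (pvScan m seen).1 = pvBp m seen := by
  unfold pvScan pvBp; rw [pvScan_eq]

theorem pvScan_snd (m : Nat) (seen : List (Nat × Int)) :
    (pvScan m seen).2 = true ↔ ∃ p ∈ seen, p.1 = m := by
  unfold pvScan; rw [pvScan_eq]
  simp

theorem pvBp_mono (m : Nat) :
    ∀ (b : Int) (p : Nat × Int), b ≤ (if m &&& p.1 == 0 && p.2 > b then p.2 else b) := by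
  intro b p
  split
  · next h => have := (Bool.and_elim_right h); simp at this; omega
  · exact le_refl _

theorem pvBp_nonneg (m : Nat) (seen : List (Nat × Int)) : 0 ≤ pvBp m seen :=
  pvFoldl_init_le _ _ (pvBp_mono m) 0

theorem pvBp_ge (m : Nat) (seen : List (Nat × Int)) (p : Nat × Int)
    (hp : p ∈ seen) (hc : m &&& p.1 = 0) : p.2 ≤ pvBp m seen := by
  apply pvFoldl_attain _ _ (pvBp_mono m) p hp
  intro b
  rw [hc]
  split
  · exact le_refl _
  · next h => simp at h; omega

theorem pvBp_cases (m : Nat) (seen : List (Nat × Int)) :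
    ∀ b : Int, seen.foldl (fun bp p => if m &&& p.1 == 0 && p.2 > bp then p.2 else bp) b = b
      ∨ ∃ p ∈ seen, m &&& p.1 = 0 ∧
          seen.foldl (fun bp p => if m &&& p.1 == 0 && p.2 > bp then p.2 else bp) b = p.2 := by
  induction seen with
  | nil => intro b; exact Or.inl rfl
  | cons q t ih =>
    intro b
    simp only [List.foldl_cons]
    by_cases hq : (m &&& q.1 == 0 && q.2 > b) = true
    · rw [if_pos hq]
      rcases ih q.2 with h | ⟨p, hp, hc, h⟩
      · exact Or.inr ⟨q, List.mem_cons_self, by simpa using (Bool.and_elim_left hq), h⟩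
      · exact Or.inr ⟨p, List.mem_cons_of_mem _ hp, hc, h⟩
    · rw [if_neg hq]
      rcases ih b with h | ⟨p, hp, hc, h⟩
      · exact Or.inl h
      · exact Or.inr ⟨p, List.mem_cons_of_mem _ hp, hc, h⟩

-- the step never decreases the running best
theorem pvF_fst_ge (st : Int × List (Nat × Int)) (w : String) : st.1 ≤ (pvF st w).1 := by
  unfold pvF
  dsimp only
  split
  · next h => omega
  · exact le_refl _

-- entries of the new record list still dominate nothing more than pvGm over ws
theorem pvF_snd_mem (st : Int × List (Nat × Int)) (w : String) (q : Nat × Int)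
    (hq : q ∈ (pvF st w).2) :
    (∃ p ∈ st.2, q.1 = p.1 ∧ (q.2 = p.2 ∨ q.2 = max p.2 (PySem.Str.len w) ∧ p.1 = pvMask w))
      ∨ q = (pvMask w, PySem.Str.len w) := by
  unfold pvF at hq
  dsimp only at hq
  split at hq
  · obtain ⟨p, hp, hfp⟩ := List.mem_map.mp hq
    left
    refine ⟨p, hp, ?_⟩
    by_cases h : (p.1 == pvMask w) = true
    · rw [if_pos h] at hfp
      have h' : p.1 = pvMask w := by simpa using h
      exact ⟨by rw [← hfp], Or.inr ⟨by rw [← hfp], h'⟩⟩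
    · rw [if_neg h] at hfp
      exact ⟨by rw [← hfp], Or.inl (by rw [← hfp])⟩
  · rcases List.mem_append.mp hq with h | h
    · exact Or.inl ⟨q, h, rfl, Or.inl rfl⟩
    · exact Or.inr (List.mem_singleton.mp h)

-- ---- B ≤ A ----
theorem pvB_le_A_aux (ws : List String) (rest : List String) :
    ∀ (st : Int × List (Nat × Int)),
      (∀ u ∈ rest, u ∈ ws) → st.1 ≤ solve_py ws →
      (∀ p ∈ st.2, p.1 ∈ ws.map pvMask ∧ p.2 ≤ pvGm ws p.1) →
      (rest.foldl pvF st).1 ≤ solve_py ws := by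
  induction rest with
  | nil => intro st _ h1 _; simpa using h1
  | cons w t ih =>
    intro st hmem h1 h2
    have hw : w ∈ ws := hmem w List.mem_cons_self
    simp only [List.foldl_cons]
    apply ih (pvF st w)
    · intro u hu; exact hmem u (List.mem_cons_of_mem _ hu)
    · -- the new best is still ≤ A
      unfold pvF
      dsimp only
      split
      · next hgt =>
        rw [pvScan_fst]
        rcases pvBp_cases (pvMask w) st.2 0 with hz | ⟨p, hp, hc, hv⟩
        · show PySem.Str.len w * pvBp (pvMask w) st.2 ≤ _
          unfold pvBp; rw [hz]; simpa using pvA_nonneg ws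
        · obtain ⟨hpk, hpv⟩ := h2 p hp
          have hmemp : pvGm ws (pvMask w) * pvGm ws p.1 ∈ pvProds ws := by
            rw [pvMem_prods]
            exact ⟨pvMask w, p.1, List.mem_map_of_mem hw, hpk, hc, rfl⟩
          have hbp : pvBp (pvMask w) st.2 = p.2 := hv
          rw [hbp]
          calc PySem.Str.len w * p.2
              ≤ pvGm ws (pvMask w) * pvGm ws p.1 :=
                mul_le_mul (pvGm_ge ws w hw) hpv
                  (hbp ▸ pvBp_nonneg (pvMask w) st.2) (pvGm_nonneg _ _)
            _ ≤ solve_py ws := pvLe_A ws _ hmemp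
      · exact h1
    · intro q hq
      rcases pvF_snd_mem st w q hq with ⟨p, hp, hq1, hq2⟩ | hnew
      · obtain ⟨hpk, hpv⟩ := h2 p hp
        rcases hq2 with h | ⟨h, hpm⟩
        · exact ⟨hq1 ▸ hpk, by rw [hq1, h]; exact hpv⟩
        · refine ⟨hq1 ▸ hpk, ?_⟩
          rw [hq1, h]
          exact max_le hpv (by rw [hpm]; exact pvGm_ge ws w hw)
      · rw [hnew]
        exact ⟨List.mem_map_of_mem hw, pvGm_ge ws w hw⟩

-- ---- A ≤ B: positional invariant over the processed prefix ----
-- each processed word has a record at its mask dominating its length,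
-- and the running best dominates every disjoint pair of processed words
def pvInv (done : List String) (st : Int × List (Nat × Int)) : Prop :=
  0 ≤ st.1 ∧
  (∀ w' ∈ done, ∃ p ∈ st.2, p.1 = pvMask w' ∧ PySem.Str.len w' ≤ p.2) ∧
  ∀ (i j : Nat) (hj : j < done.length) (hi : i < j),
    pvMask done[i] &&& pvMask done[j] = 0 →
    PySem.Str.len done[i] * PySem.Str.len done[j] ≤ st.1

theorem pvInv_step (done : List String) (st : Int × List (Nat × Int)) (w : String)
    (h : pvInv done st) : pvInv (done ++ [w]) (pvF st w) := by
  obtain ⟨hnn, hrec, hpairs⟩ := h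
  have hstep := pvF_fst_ge st w
  refine ⟨le_trans hnn hstep, ?_, ?_⟩
  · -- records still dominate, and the new word has one
    intro w' hw'
    rcases List.mem_append.mp hw' with hold | hnew
    · obtain ⟨p, hp, hpk, hpl⟩ := hrec w' hold
      unfold pvF
      dsimp only
      split
      · refine ⟨(if p.1 == pvMask w then (p.1, max p.2 (PySem.Str.len w)) else p),
          List.mem_map_of_mem hp, ?_⟩
        by_cases hc : (p.1 == pvMask w) = true
        · rw [if_pos hc]
          exact ⟨hpk, le_trans hpl (le_max_left _ _)⟩
        · rw [if_neg hc]
          exact ⟨hpk, hpl⟩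
      · exact ⟨p, List.mem_append_left _ hp, hpk, hpl⟩
    · rw [List.mem_singleton.mp hnew]
      unfold pvF
      dsimp only
      by_cases hs : (pvScan (pvMask w) st.2).2 = true
      · rw [if_pos hs]
        obtain ⟨p, hp, hpk⟩ := (pvScan_snd (pvMask w) st.2).mp hs
        refine ⟨(p.1, max p.2 (PySem.Str.len w)), ?_, by rw [hpk], le_max_right _ _⟩
        have : (if p.1 == pvMask w then (p.1, max p.2 (PySem.Str.len w)) else p)
            = (p.1, max p.2 (PySem.Str.len w)) := by rw [if_pos (by simpa using hpk)]
        exact this ▸ List.mem_map_of_mem hp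
      · rw [if_neg hs]
        exact ⟨(pvMask w, PySem.Str.len w), List.mem_append_right _ (by simp),
          rfl, le_refl _⟩
  · intro i j hj hi hdisj
    rw [List.length_append, List.length_singleton] at hj
    by_cases hjlt : j < done.length
    · have hil : i < done.length := lt_trans hi hjlt
      rw [List.getElem_append_left hil, List.getElem_append_left hjlt] at hdisj ⊢
      exact le_trans (hpairs i j hjlt hi hdisj) hstep
    · have hjd : j = done.length := by omega
      have hil : i < done.length := by omega
      subst hjd
      have hwj : (done ++ [w])[done.length]'(by simp) = w := by simp
      rw [List.getElem_append_left hil] at hdisj ⊢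
      rw [hwj] at hdisj ⊢
      -- new pair (i, |done|): the record at done[i]'s mask feeds bp
      obtain ⟨p, hp, hpk, hpl⟩ := hrec done[i] (List.getElem_mem hil)
      have hc : pvMask w &&& p.1 = 0 := by
        rw [hpk, Nat.and_comm]; exact hdisj
      have hbp : PySem.Str.len done[i] ≤ pvBp (pvMask w) st.2 :=
        le_trans hpl (pvBp_ge (pvMask w) st.2 p hp hc)
      have hl : PySem.Str.len done[i] * PySem.Str.len w
          ≤ PySem.Str.len w * pvBp (pvMask w) st.2 := by
        rw [mul_comm]
        exact mul_le_mul_of_nonneg_left hbp (pvLen_nonneg w)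
      unfold pvF
      dsimp only
      rw [pvScan_fst]
      split
      · exact hl
      · next hng => omega

theorem pvInv_fold (rest : List String) :
    ∀ (done : List String) (st : Int × List (Nat × Int)),
      pvInv done st → pvInv (done ++ rest) (rest.foldl pvF st) := by
  induction rest with
  | nil => intro done st h; simpa using h
  | cons w t ih =>
    intro done st h
    have := ih (done ++ [w]) (pvF st w) (pvInv_step done st w h)
    simpa [List.append_assoc] using this

theorem pvInv_final (ws : List String) : pvInv ws (ws.foldl pvF (0, [])) := by
  have hnil : pvInv [] ((0 : Int), ([] : List (Nat × Int))) := by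
    refine ⟨le_refl _, ?_, ?_⟩
    · intro w' hw'; cases hw'
    · intro i j hj hi; simp at hj
  have := pvInv_fold ws [] (0, []) hnil
  simpa using this

-- a zero mask means the empty word
theorem pvMask_zero_foldl (l : List Char) :
    ∀ m : Nat, l.foldl (fun m ch => m ||| (1 <<< (ch.toNat - 97))) m = 0 → m = 0 ∧ l = [] := by
  induction l with
  | nil => intro m h; exact ⟨h, rfl⟩
  | cons c t ih =>
    intro m h
    simp only [List.foldl_cons] at h
    obtain ⟨h0, -⟩ := ih _ h
    rw [Nat.one_shiftLeft] at h0
    have h2 := Nat.right_le_or (n := m) (m := 2 ^ (c.toNat - 97))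
    have h3 := Nat.two_pow_pos (c.toNat - 97)
    exfalso
    omega

theorem pvMask_zero_len (w : String) (h : pvMask w = 0) : PySem.Str.len w = 0 := by
  unfold pvMask at h
  obtain ⟨-, hl⟩ := pvMask_zero_foldl w.toList 0 h
  simp [PySem.Str.len_eq, hl]

theorem pvA_le_B (ws : List String) : solve_py ws ≤ solve_py_alt ws := by
  rw [pvAlt_eq]
  obtain ⟨hnn, hrec, hpairs⟩ := pvInv_final ws
  rw [pvA_eq]
  cases hm : PySem.List.max? (pvProds ws) (fun x => x) with
  | none => exact hnn
  | some M =>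
    obtain ⟨a, b, ha, hb, hab, hxeq⟩ := (pvMem_prods ws M).mp (PySem.List.max?_mem hm)
    obtain ⟨wa, hwa, hwam, hga⟩ := pvGm_attained ws a ha
    obtain ⟨wb, hwb, hwbm, hgb⟩ := pvGm_attained ws b hb
    obtain ⟨i, hi, hei⟩ := List.mem_iff_getElem.mp hwa
    obtain ⟨j, hj, hej⟩ := List.mem_iff_getElem.mp hwb
    rw [hxeq, hga, hgb]
    rcases lt_trichotomy i j with hlt | heq | hgt
    · have := hpairs i j hj hlt (by rw [hei, hej, hwam, hwbm]; exact hab)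
      rw [hei, hej] at this
      exact this
    · -- same position: a = b and a &&& a = 0 forces a = 0, hence both lengths are 0
      subst heq
      have hwab : wa = wb := hei.symm.trans hej
      have haz : a = 0 := by
        rw [← hwam, hwab, hwbm] at hab ⊢
        simpa [Nat.and_self] using hab
      have hlen0 : PySem.Str.len wa = 0 := pvMask_zero_len wa (by rw [hwam, haz])
      rw [hlen0, zero_mul]
      exact hnn
    · have := hpairs j i hi hgt (by rw [hei, hej, hwam, hwbm, Nat.and_comm]; exact hab)
      rw [hei, hej, mul_comm] at this
      exact this

-- ===== VERDICT (by name: the statement is the Claim_ definition above) =====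
theorem solve_py_spec : Claim_equal_solve_py := by
  intro ws _ _
  unfold Spec_solve_py
  have hBA : solve_py_alt ws ≤ solve_py ws := by
    rw [pvAlt_eq]
    exact pvB_le_A_aux ws ws (0, []) (fun u hu => hu) (pvA_nonneg ws) (by simp)
  exact le_antisymm (pvA_le_B ws) hBA
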